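-- pv_equiv track=rewrite | github.com/Edwin-Tu/2026-python | weeks/week-05/solutions/1114405014/UVA-10057/UVA_10057.py | analyze_password
-- ===== SOURCE A (Python) =====
-- def analyze_password(nums: list[int]) -> tuple[int, int, int]:
--     sorted_nums = sorted(nums)
--     n = len(sorted_nums)
--
--     left_median = sorted_nums[(n - 1) // 2]
--     right_median = sorted_nums[n // 2]
--
--     best_a = left_median
--     count_in_range = sum(1 for num in sorted_nums if left_median <= num <= right_median)
--     number_of_best_a = right_median - left_median + 1
--
--     return best_a, count_in_range, number_of_best_a
-- ===== SOURCE B (Python) =====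
-- def analyze_password(nums: list[int]) -> tuple[int, int, int]:
--     # Counting-based selection: build a frequency table once, sort only the
--     # distinct values, and pick each median by a cumulative-count scan.
--     counts = {}
--     for x in nums:
--         counts[x] = counts.get(x, 0) + 1
--     keys = sorted(counts)
--     n = len(nums)
--
--     def select(k):
--         cum = 0
--         for v in keys:
--             cum += counts[v]
--             if k < cum:
--                 return v
--
--     left_median = select((n - 1) // 2)
--     right_median = select(n // 2)
--     count_in_range = sum(1 for x in nums if left_median <= x <= right_median)
--     return left_median, count_in_range, right_median - left_median + 1
-- ===== Notes on version B (the rewrite author's own statement) =====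
-- stated objective: alternative
-- what changed: B replaces A's full sort plus median indexing by a one-pass frequency table, a sort of the distinct values only, and a cumulative-count scan that selects each median by rank.
import Mathlib
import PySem

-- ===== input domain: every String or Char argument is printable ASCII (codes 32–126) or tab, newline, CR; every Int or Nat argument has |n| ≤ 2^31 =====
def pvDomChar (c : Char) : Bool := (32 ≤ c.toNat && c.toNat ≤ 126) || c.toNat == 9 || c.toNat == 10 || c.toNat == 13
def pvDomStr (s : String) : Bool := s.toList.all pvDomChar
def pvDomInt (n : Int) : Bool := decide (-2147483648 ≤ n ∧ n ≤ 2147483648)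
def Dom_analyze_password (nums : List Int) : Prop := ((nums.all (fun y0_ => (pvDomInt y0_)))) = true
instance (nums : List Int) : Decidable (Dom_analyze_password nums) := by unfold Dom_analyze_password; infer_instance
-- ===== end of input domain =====

-- B replaces A's "sort everything, index the medians" by a frequency table built in one
-- pass, a sort of the distinct values only, and a cumulative-count scan selecting each median.

-- ===== PORT A =====
def analyze_password (nums : List Int) : Int × Int × Int :=
  let sorted_nums := PySem.List.sorted nums (fun x => x) false
  let n : Int := PySem.List.len sorted_nums
  match PySem.List.pyGet? sorted_nums (PySem.Int.floordiv (n - 1) 2),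
        PySem.List.pyGet? sorted_nums (PySem.Int.floordiv n 2) with
  | some left_median, some right_median =>
      (left_median,
       sorted_nums.foldl
         (fun acc num => if left_median ≤ num ∧ num ≤ right_median then acc + 1 else acc) 0,
       right_median - left_median + 1)
  | _, _ => (0, 0, 0)   -- IndexError (empty list); excluded by Pre_

-- ===== PORT B =====
-- `select(k)`: walk the sorted distinct values accumulating counts; `none` = the Python
-- loop falling through (never happens for 0 ≤ k < len(nums)).
def pvSelect (counts : PySem.Dict Int Int) (k : Int) (cum : Int) : List Int → Option Int
  | [] => none
  | v :: rest =>
      let cum' := cum + counts.getD v 0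
      if k < cum' then some v else pvSelect counts k cum' rest

def analyze_password_alt (nums : List Int) : Int × Int × Int :=
  let counts := nums.foldl (fun d x => d.insert x (d.getD x 0 + 1))
                  (PySem.Dict.empty : PySem.Dict Int Int)
  let keys := PySem.List.sorted counts.keys (fun x => x) false
  let n : Int := PySem.List.len nums
  let left_median := (pvSelect counts (PySem.Int.floordiv (n - 1) 2) 0 keys).getD 0
  let right_median := (pvSelect counts (PySem.Int.floordiv n 2) 0 keys).getD 0
  let count_in_range := nums.foldl
    (fun acc x => if left_median ≤ x ∧ x ≤ right_median then acc + 1 else acc) 0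
  (left_median, count_in_range, right_median - left_median + 1)

-- ===== PRECONDITION & SPEC =====
-- A raises IndexError on the empty list (sorted_nums[-1//2] of []); excluded.
def Pre_analyze_password (nums : List Int) : Prop := nums ≠ []
instance (nums : List Int) : Decidable (Pre_analyze_password nums) := by
  unfold Pre_analyze_password; infer_instance
def pvWitness_analyze_password : List Int := [3, 1, 2, 2]

def Spec_analyze_password (nums : List Int) (out : Int × Int × Int) : Prop :=
  out = analyze_password_alt nums
instance (nums : List Int) (out : Int × Int × Int) : Decidable (Spec_analyze_password nums out) := by
  unfold Spec_analyze_password; infer_instance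

-- ===== CLAIM (what is proved, stated in full; the proofs are below) =====
def Claim_equal_analyze_password : Prop :=
  ∀ (nums : List Int), Dom_analyze_password nums → Pre_analyze_password nums →
    Spec_analyze_password nums (analyze_password nums)

-- ===== LEMMAS AND PROOFS =====

lemma pv_countP_le_split (l : List Int) (v : Int) :
    l.countP (fun x => decide (x ≤ v)) = l.countP (fun x => decide (x < v)) + l.count v := by
  induction l with
  | nil => simp
  | cons a t ih =>
    simp only [List.countP_cons, List.count_cons, ih]
    rcases lt_trichotomy a v with h|h|h
    · simp [h, le_of_lt h, ne_of_lt h]; omega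
    · simp [h]; omega
    · simp [not_le.mpr h, not_lt.mpr (le_of_lt h), (ne_of_gt h)]


lemma pv_countP_mem_append (l d : List Int) (v : Int) (hv : v ∉ d) :
    l.countP (fun x => decide (x ∈ d ++ [v])) =
      l.countP (fun x => decide (x ∈ d)) + l.count v := by
  induction l with
  | nil => simp
  | cons a t ih =>
    simp only [List.countP_cons, List.count_cons, ih]
    by_cases h : a = v
    · subst h; simp [hv]; omega
    · by_cases h2 : a ∈ d <;> simp [h, h2] <;> try omega

lemma pvSelect_spec (nums : List Int) :
    ∀ (ks done : List Int) (k : Int),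
      ks.Pairwise (· < ·) →
      (∀ a ∈ done, ∀ b ∈ ks, a < b) →
      (∀ x ∈ nums, x ∈ done ∨ x ∈ ks) →
      ((nums.countP (fun x => decide (x ∈ done)) : Int)) ≤ k →
      k < (nums.length : Int) →
      ∃ v, pvSelect (PySem.Dict.counter nums) k
              ((nums.countP (fun x => decide (x ∈ done)) : Int)) ks = some v ∧
           ((nums.countP (fun x => decide (x < v)) : Int)) ≤ k ∧
           k < ((nums.countP (fun x => decide (x ≤ v)) : Int)) := by
  intro ks
  induction ks with
  | nil =>
    intro done k _ _ h3 h4 h5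
    exfalso
    have : nums.countP (fun x => decide (x ∈ done)) = nums.length := by
      apply List.countP_eq_length.mpr
      intro x hx
      simpa using (h3 x hx).resolve_right (by simp)
    omega
  | cons v rest ih =>
    intro done k hpw h2 h3 h4 h5
    have hcnt : (PySem.Dict.counter nums).getD v 0 = (nums.count v : Int) :=
      PySem.Dict.getD_counter nums v
    have hlt : ∀ x ∈ nums, decide (x ∈ done) = decide (x < v) := by
      intro x hx
      rcases h3 x hx with hd | hks
      · simp [hd, h2 x hd v (by simp)]
      · have : v ≤ x := by
          rcases List.mem_cons.mp hks with rfl | hr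
          · exact le_refl x
          · exact le_of_lt ((List.pairwise_cons.mp hpw).1 x hr)
        simp [not_lt.mpr this]
        intro hd
        exact absurd (h2 x hd v (by simp)) (not_lt.mpr this)
    have hclt : nums.countP (fun x => decide (x ∈ done)) =
        nums.countP (fun x => decide (x < v)) := List.countP_congr (fun x hx => by rw [hlt x hx])
    simp only [pvSelect, hcnt]
    by_cases hk : k < (nums.countP (fun x => decide (x ∈ done)) : Int) + (nums.count v : Int)
    · refine ⟨v, by simp [hk], by omega, ?_⟩
      have := pv_countP_le_split nums v
      omega
    · rw [if_neg hk]
      have hvnd : v ∉ done := fun hd => lt_irrefl v (h2 v hd v (by simp))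
      have hcum : (nums.countP (fun x => decide (x ∈ done)) : Int) + (nums.count v : Int) =
          (nums.countP (fun x => decide (x ∈ done ++ [v])) : Int) := by
        rw [pv_countP_mem_append nums done v hvnd]; push_cast; ring
      rw [hcum]
      apply ih (done ++ [v]) k (List.pairwise_cons.mp hpw).2
      · intro a ha b hb
        rcases List.mem_append.mp ha with h | h
        · exact h2 a h b (List.mem_cons_of_mem v hb)
        · simp at h; subst h; exact (List.pairwise_cons.mp hpw).1 b hb
      · intro x hx
        rcases h3 x hx with h | h
        · exact Or.inl (List.mem_append.mpr (Or.inl h))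
        · rcases List.mem_cons.mp h with rfl | h
          · exact Or.inl (by simp)
          · exact Or.inr h
      · omega
      · exact h5

lemma pv_rank_unique (l : List Int) (k : Nat) (v : Int)
    (hk : k < (PySem.List.sorted l (fun x => x) false).length)
    (h1 : l.countP (fun x => decide (x < v)) ≤ k)
    (h2 : k < l.countP (fun x => decide (x ≤ v))) :
    (PySem.List.sorted l (fun x => x) false)[k] = v := by
  set s := PySem.List.sorted l (fun x => x) false with hs
  have hperm : s.Perm l := PySem.List.sorted_perm l (fun x => x) false
  have hc1 : s.countP (fun x => decide (x < v)) ≤ k := by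
    rw [hperm.countP_eq]; exact h1
  have hc2 : k < s.countP (fun x => decide (x ≤ v)) := by
    rw [hperm.countP_eq]; exact h2
  have hmono : ∀ p q : Nat, (hpq : p ≤ q) → (hq : q < s.length) → s[p]'(lt_of_le_of_lt hpq hq) ≤ s[q] := by
    intro p q hpq hq
    exact PySem.List.sorted_id_getElem_mono l hpq hq
  rcases lt_trichotomy s[k] v with h | h | h
  · exfalso
    have htake : (s.take (k+1)).countP (fun x => decide (x < v)) = k + 1 := by
      have hall : ∀ a ∈ s.take (k+1), decide (a < v) = true := by
        intro a ha
        rw [List.mem_take_iff_getElem] at ha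
        obtain ⟨i, hi, rfl⟩ := ha
        have hik : i ≤ k := by omega
        have := hmono i k hik hk
        simp; omega
      rw [List.countP_eq_length.mpr hall, List.length_take]
      omega
    have := List.Sublist.countP_le (p := fun x => decide (x < v)) (List.take_sublist (k+1) s)
    omega
  · exact h
  · exfalso
    have hsplit : s.countP (fun x => decide (x ≤ v)) =
        (s.take k).countP (fun x => decide (x ≤ v)) + (s.drop k).countP (fun x => decide (x ≤ v)) := by
      rw [← List.countP_append, List.take_append_drop]
    have hdrop : (s.drop k).countP (fun x => decide (x ≤ v)) = 0 := by
      apply List.countP_eq_zero.mpr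
      intro a ha
      rw [List.mem_iff_getElem] at ha
      obtain ⟨i, hi, rfl⟩ := ha
      rw [List.getElem_drop]
      have hlen : k + i < s.length := by
        rw [List.length_drop] at hi; omega
      have := hmono k (k+i) (by omega) hlen
      simp; omega
    have htk : (s.take k).countP (fun x => decide (x ≤ v)) ≤ k := by
      have := List.countP_le_length (p := fun x => decide (x ≤ v)) (l := s.take k)
      simp [List.length_take] at this ⊢
      omega
    omega

lemma pvSelect_eq_sorted_get (nums : List Int) (k : Int)
    (h0 : 0 ≤ k) (hk : k < (nums.length : Int))
    (hlen : k.toNat < (PySem.List.sorted nums (fun x => x) false).length) :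
    pvSelect (PySem.Dict.counter nums) k 0
        (PySem.List.sorted (PySem.Dict.counter nums).keys (fun x => x) false) =
      some ((PySem.List.sorted nums (fun x => x) false)[k.toNat]) := by
  have hkeys : (PySem.Dict.counter nums).keys = PySem.Set.ofList nums :=
    PySem.Dict.keys_counter nums
  have hpw : (PySem.List.sorted (PySem.Dict.counter nums).keys (fun x => x) false).Pairwise (· < ·) := by
    rw [hkeys]; exact PySem.List.sorted_ofList_pairwise_lt nums
  have hmem : ∀ x ∈ nums, x ∈ PySem.List.sorted (PySem.Dict.counter nums).keys (fun x => x) false := by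
    intro x hx
    rw [PySem.List.mem_sorted, hkeys]
    exact (PySem.Set.mem_ofList _ _).mpr hx
  obtain ⟨v, hsel, hlo, hhi⟩ :=
    pvSelect_spec nums (PySem.List.sorted (PySem.Dict.counter nums).keys (fun x => x) false) [] k
      hpw (by simp) (fun x hx => Or.inr (hmem x hx)) (by simp; omega) hk
  rw [show ((nums.countP (fun x => decide (x ∈ ([] : List Int))) : Int)) = 0 by simp] at hsel
  rw [hsel]
  congr 1
  have := pv_rank_unique nums k.toNat v hlen (by omega) (by omega)
  omega

-- ===== VERDICT (by name: the statement is the Claim_ definition above) =====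
theorem analyze_password_spec : Claim_equal_analyze_password := by
  intro nums _ hpre
  unfold Spec_analyze_password
  have hne : nums ≠ [] := hpre
  have hn : 0 < nums.length := List.length_pos_iff.mpr hne
  have hslen : (PySem.List.sorted nums (fun x => x) false).length = nums.length :=
    PySem.List.length_sorted nums (fun x => x) false
  have hcounter : nums.foldl (fun d x => d.insert x (d.getD x 0 + 1))
      (PySem.Dict.empty : PySem.Dict Int Int) = PySem.Dict.counter nums :=
    PySem.Dict.foldl_insert_getD_add_one_eq_counter nums
  set s := PySem.List.sorted nums (fun x => x) false with hs
  have hlen_s : PySem.List.len s = (nums.length : Int) := by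
    rw [PySem.List.len_eq, hslen]
  have hlen_n : PySem.List.len nums = (nums.length : Int) := PySem.List.len_eq nums
  have e1 : PySem.Int.floordiv ((nums.length : Int) - 1) 2 = ((nums.length : Int) - 1) / 2 :=
    PySem.Int.floordiv_eq_ediv_of_pos (by norm_num)
  have e2 : PySem.Int.floordiv ((nums.length : Int)) 2 = ((nums.length : Int)) / 2 :=
    PySem.Int.floordiv_eq_ediv_of_pos (by norm_num)
  have hk1 : 0 ≤ ((nums.length : Int) - 1) / 2 ∧ ((nums.length : Int) - 1) / 2 < (nums.length : Int) := by omega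
  have hk2 : 0 ≤ ((nums.length : Int)) / 2 ∧ ((nums.length : Int)) / 2 < (nums.length : Int) := by omega
  have hb1 : ((((nums.length : Int) - 1) / 2)).toNat < s.length := by rw [hslen]; omega
  have hb2 : ((((nums.length : Int))) / 2).toNat < s.length := by rw [hslen]; omega
  have hg1 : PySem.List.pyGet? s (PySem.Int.floordiv ((PySem.List.len s) - 1) 2) =
      some (s[(((nums.length : Int) - 1) / 2).toNat]'hb1) := by
    rw [hlen_s, e1]
    exact PySem.List.pyGet?_eq_some_getElem _ hk1.1 (by rw [hslen]; exact_mod_cast hk1.2)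
  have hg2 : PySem.List.pyGet? s (PySem.Int.floordiv (PySem.List.len s) 2) =
      some (s[(((nums.length : Int)) / 2).toNat]'hb2) := by
    rw [hlen_s, e2]
    exact PySem.List.pyGet?_eq_some_getElem _ hk2.1 (by rw [hslen]; exact_mod_cast hk2.2)
  have hs1 : pvSelect (PySem.Dict.counter nums) (PySem.Int.floordiv ((PySem.List.len nums) - 1) 2) 0
        (PySem.List.sorted (PySem.Dict.counter nums).keys (fun x => x) false) =
      some (s[(((nums.length : Int) - 1) / 2).toNat]'hb1) := by
    rw [hlen_n, e1]
    exact pvSelect_eq_sorted_get nums _ hk1.1 hk1.2 (by rw [hslen]; omega)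
  have hs2 : pvSelect (PySem.Dict.counter nums) (PySem.Int.floordiv (PySem.List.len nums) 2) 0
        (PySem.List.sorted (PySem.Dict.counter nums).keys (fun x => x) false) =
      some (s[(((nums.length : Int)) / 2).toNat]'hb2) := by
    rw [hlen_n, e2]
    exact pvSelect_eq_sorted_get nums _ hk2.1 hk2.2 (by rw [hslen]; omega)
  have hperm : s.Perm nums := PySem.List.sorted_perm nums (fun x => x) false
  have hcount : ∀ lm rm : Int,
      s.foldl (fun acc num => if lm ≤ num ∧ num ≤ rm then acc + 1 else acc) (0:Int) =
      nums.foldl (fun acc x => if lm ≤ x ∧ x ≤ rm then acc + 1 else acc) (0:Int) := by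
    intro lm rm
    rw [PySem.List.foldl_ite_add_one, PySem.List.foldl_ite_add_one, hperm.countP_eq]
  simp only [analyze_password, analyze_password_alt, ← hs]
  rw [hg1, hg2, hcounter, hs1, hs2]
  simp only [Option.getD_some, hcount]
  rfl
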